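-- pv_equiv track=rewrite | github.com/mueedurrehman/Python-Interview-Practice | HackerRankSolutions.py | smallestString
-- ===== SOURCE A (Python) =====
-- def smallestString(weight):
--     multiplier = 3
--     weights = [1] * 26
--     alphabet = []
--     for letter in range(65, 91):
--         alphabet.append(chr(letter))
--     #populated the weights
--     for i in range(1, len(weights)):
--         weights[i] = multiplier * weights[i - 1]
--         multiplier += 1
--     remainingWeight = weight
--     string = ""
--     start = 25
--     while remainingWeight > 0:
--         for i in range(start, -1, - 1):
--             if remainingWeight / weights[i] >= 1:
--                 divisor = weights[i]
--                 quotient = remainingWeight // divisor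
--                 string = string + (quotient * alphabet[i])
--                 remainingWeight = remainingWeight % divisor
--                 start = i - 1
--                 break
--     return string[::-1]
-- ===== SOURCE B (Python) =====
-- def smallestString(weight):
--     # Mixed-radix digit extraction: weights are 1,3,12,... with ratios 3..27,
--     # so extract digits low-to-high with mod/div and emit letters in ascending order.
--     if weight <= 0:
--         return ""
--     w = weight
--     digits = []
--     for r in range(3, 28):
--         digits.append(w % r)
--         w //= r
--     digits.append(w)
--     return ''.join(chr(65 + i) * digits[i] for i in range(26))
-- ===== Notes on version B (the rewrite author's own statement) =====
-- stated objective: simpler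
-- what changed: A precomputes a 26-entry weights table and greedily scans it top-down inside a while loop, building the string backwards and reversing it; B recognises the weights as a mixed-radix system with ratios 3..27 and extracts each letter count directly with w % r, w //= r in one ascending pass, joining the letter blocks in order with no table, no inner scan and no reversal.
import Mathlib
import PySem

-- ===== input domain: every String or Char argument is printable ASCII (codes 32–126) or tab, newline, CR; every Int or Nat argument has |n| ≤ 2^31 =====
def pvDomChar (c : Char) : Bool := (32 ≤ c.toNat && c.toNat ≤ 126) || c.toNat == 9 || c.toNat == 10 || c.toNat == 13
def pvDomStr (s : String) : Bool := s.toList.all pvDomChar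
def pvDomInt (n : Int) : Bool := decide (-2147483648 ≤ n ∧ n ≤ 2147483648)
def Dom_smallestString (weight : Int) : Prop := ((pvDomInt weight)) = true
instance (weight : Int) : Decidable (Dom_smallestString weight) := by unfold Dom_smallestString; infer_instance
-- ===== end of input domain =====

-- B replaces A's greedy descending scan over a precomputed weights table by mixed-radix
-- digit extraction (w % r, w //= r for r = 3..27) joined in ascending order (objective: simpler).

-- ===== PORT A =====
-- `for i in range(1, len(weights)): weights[i] = multiplier * weights[i-1]; multiplier += 1`
def pvWeights : List Int :=
  (((PySem.List.pyRange 1 26 1).foldl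
      (fun (st : List Int × Int) i =>
        (PySem.List.pySetD st.1 i (st.2 * PySem.List.pyGetD st.1 (i - 1) 0), st.2 + 1))
      (List.replicate 26 1, 3))).1

-- `for letter in range(65, 91): alphabet.append(chr(letter))`  (chr is exact here: codes 65..90)
def pvAlphabet : List Char :=
  (PySem.List.pyRange 65 91 1).foldl (fun acc l => acc ++ [Char.ofNat l.toNat]) []

-- the inner `for i in range(start, -1, -1)` up to its break: first i with the condition.
-- Python's float test `remainingWeight / weights[i] >= 1` equals `weights[i] ≤ remainingWeight`
-- exactly here: weights[i] ≥ 1 and |remainingWeight| ≤ 2^31 < 2^53, so the float quotient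
-- rounds to ≥ 1 iff the exact quotient is ≥ 1.
def pvAFind (r : Int) : List Int → Option Int
  | [] => none
  | i :: rest =>
    if PySem.List.pyGetD pvWeights i 0 ≤ r then some i else pvAFind r rest

-- the `while remainingWeight > 0` loop; fuel only makes it total (remainingWeight strictly
-- decreases each iteration, so `weight.toNat + 1` is always enough; the `none` arm is the
-- case where Python's for-loop would finish without breaking, unreachable since weights[0] = 1).
def pvAWhile (fuel : Nat) (r start : Int) (s : List Char) : List Char :=
  match fuel with
  | 0 => s
  | fuel + 1 =>
    if 0 < r then
      match pvAFind r (PySem.List.pyRange start (-1) (-1)) with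
      | none => s
      | some i =>
        let divisor := PySem.List.pyGetD pvWeights i 0
        let quotient := PySem.Int.floordiv r divisor
        pvAWhile fuel (PySem.Int.mod r divisor) (i - 1)
          (s ++ PySem.List.pyRepeat [PySem.List.pyGetD pvAlphabet i ' '] quotient)
    else s

-- `return string[::-1]` : reverse (cf. PySem.List.slice?_none_none_neg_one)
def smallestString (weight : Int) : String :=
  String.ofList ((pvAWhile (weight.toNat + 1) weight 25 []).reverse)

-- ===== PORT B =====
-- `for r in range(3, 28): digits.append(w % r); w //= r`
def pvBDigits (weight : Int) : List Int × Int :=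
  (PySem.List.pyRange 3 28 1).foldl
    (fun (st : List Int × Int) r => (st.1 ++ [PySem.Int.mod st.2 r], PySem.Int.floordiv st.2 r))
    ([], weight)

-- `''.join(chr(65 + i) * digits[i] for i in range(26))`
def smallestString_alt (weight : Int) : String :=
  if weight ≤ 0 then "" else
    let st := pvBDigits weight
    let digits := st.1 ++ [st.2]
    String.ofList ((PySem.List.pyRange 0 26 1).foldl
      (fun acc i =>
        acc ++ PySem.List.pyRepeat [Char.ofNat (65 + i).toNat] (PySem.List.pyGetD digits i 0))
      [])

-- ===== PRECONDITION & SPEC =====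
def Spec_smallestString (weight : Int) (out : String) : Prop := out = smallestString_alt weight
instance (weight : Int) (out : String) : Decidable (Spec_smallestString weight out) := by unfold Spec_smallestString; infer_instance

-- ===== CLAIM (what is proved, stated in full; the proofs are below) =====
def Claim_equal_smallestString : Prop := ∀ (weight : Int), Dom_smallestString weight → Spec_smallestString weight (smallestString weight)

-- ===== LEMMAS AND PROOFS =====

-- the weight of letter class i: 1, 3, 12, 60, … with ratio i+3 between steps i and i+1
def pvW : Nat → Int
  | 0 => 1
  | n + 1 => ((n : Int) + 3) * pvW n

lemma pvW_pos (n : Nat) : 0 < pvW n := by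
  induction n with
  | zero => decide
  | succ n ih => have : (0:Int) < (n:Int) + 3 := by positivity
                 simpa [pvW] using mul_pos this ih

lemma pvW_lt_succ (n : Nat) : pvW n < pvW (n + 1) := by
  have h := pvW_pos n
  have : (1:Int) * pvW n < ((n:Int) + 3) * pvW n := by
    apply mul_lt_mul_of_pos_right _ h; omega
  simpa [pvW] using this

lemma pvW_mono {m n : Nat} (h : m ≤ n) : pvW m ≤ pvW n := by
  induction n with
  | zero => simp_all
  | succ n ih =>
    rcases Nat.lt_or_ge m (n+1) with h' | h'
    · exact le_trans (ih (by omega)) (le_of_lt (pvW_lt_succ n))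
    · have : m = n + 1 := by omega
      simp [this]

lemma pvW_dvd {m n : Nat} (h : m ≤ n) : pvW m ∣ pvW n := by
  induction n with
  | zero => simp_all
  | succ n ih =>
    rcases Nat.lt_or_ge m (n+1) with h' | h'
    · exact Dvd.dvd.mul_left (ih (by omega)) _
    · have : m = n + 1 := by omega
      simp [this]

-- the weights table A builds is exactly pvW
set_option maxRecDepth 8192 in
lemma pvWeights_eq : pvWeights = (List.range 26).map pvW := by decide

lemma pvWeights_getD (i : Nat) (h : i < 26) :
    PySem.List.pyGetD pvWeights (i : Int) 0 = pvW i := by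
  rw [PySem.List.pyGetD_natCast, pvWeights_eq]
  rw [List.getD_eq_getElem _ _ (by simpa using h)]
  simp

-- the letter for class i
def pvL (i : Nat) : Char := Char.ofNat (65 + i)

set_option maxRecDepth 8192 in
lemma pvAlphabet_eq : pvAlphabet = (List.range 26).map pvL := by decide

lemma pvAlphabet_getD (i : Nat) (h : i < 26) :
    PySem.List.pyGetD pvAlphabet (i : Int) ' ' = pvL i := by
  rw [PySem.List.pyGetD_natCast, pvAlphabet_eq]
  rw [List.getD_eq_getElem _ _ (by simpa using h)]
  simp

-- the canonical block of letters for class i given remaining weight r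
def pvBlock (r : Int) (i : Nat) : List Char :=
  List.replicate ((r % pvW (i + 1) / pvW i).toNat) (pvL i)

-- A's inner scan finds the greatest class i < t with pvW i ≤ r
lemma pvAFind_spec (r : Int) (hr : 1 ≤ r) :
    ∀ t : Nat, 1 ≤ t → t ≤ 26 → r < pvW t →
    ∃ i0 : Nat, i0 < t ∧ pvW i0 ≤ r ∧ r < pvW (i0 + 1) ∧
      pvAFind r (PySem.List.pyRange ((t : Int) - 1) (-1) (-1)) = some (i0 : Int) := by
  intro t
  induction t with
  | zero => omega
  | succ n ih =>
    intro _ h26 hlt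
    have hcast : ((n + 1 : Nat) : Int) - 1 = (n : Int) := by push_cast; ring
    rw [hcast, PySem.List.pyRange_neg_one_cons (by omega : (-1 : Int) < (n : Int))]
    by_cases hc : pvW n ≤ r
    · refine ⟨n, by omega, hc, hlt, ?_⟩
      simp [pvAFind, pvWeights_getD n (by omega), hc]
    · have hn1 : 1 ≤ n := by
        by_contra h
        have hn0 : n = 0 := by omega
        subst hn0
        simp [pvW] at hc; omega
      obtain ⟨i0, h1, h2, h3, h4⟩ := ih hn1 (by omega) (not_le.mp hc)
      refine ⟨i0, by omega, h2, h3, ?_⟩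
      simpa [pvAFind, pvWeights_getD n (by omega), hc] using h4

lemma pvBlock_zero (i : Nat) : pvBlock 0 i = [] := by
  simp [pvBlock]

lemma pvBlock_of_lt (r : Int) (j : Nat) (h0 : 0 ≤ r) (h : r < pvW j) : pvBlock r j = [] := by
  have h1 : r < pvW (j + 1) := lt_of_lt_of_le h (le_of_lt (pvW_lt_succ j))
  simp [pvBlock, Int.emod_eq_of_lt h0 h1, Int.ediv_eq_zero_of_lt h0 h]

lemma pvBlock_mod (r : Int) (i0 j : Nat) (h : j < i0) : pvBlock (r % pvW i0) j = pvBlock r j := by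
  have hd : pvW (j + 1) ∣ pvW i0 := pvW_dvd (by omega)
  simp [pvBlock, Int.emod_emod_of_dvd _ hd]

lemma flatten_desc (r : Int) (i0 : Nat) :
    ∀ t : Nat, i0 < t → (∀ j, i0 < j → j < t → pvBlock r j = []) →
    ((List.range t).reverse.map (pvBlock r)).flatten
      = pvBlock r i0 ++ ((List.range i0).reverse.map (pvBlock r)).flatten := by
  intro t
  induction t with
  | zero => omega
  | succ n ih =>
    intro h hz
    rw [List.range_succ, List.reverse_append]
    by_cases hni : i0 = n
    · subst hni; simp
    · have h1 : i0 < n := by omega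
      simpa [hz n (by omega) (by omega)] using ih h1 (fun j a b => hz j a (by omega))

-- the main loop invariant: with start = t - 1 and 0 ≤ r < pvW t, A's while loop appends the
-- descending concatenation of the blocks for classes t-1, …, 0
lemma pvAWhile_spec :
    ∀ n : Nat, ∀ r : Int, r.toNat = n → ∀ t : Nat, t ≤ 26 → 0 ≤ r → r < pvW t →
    ∀ fuel : Nat, n < fuel → ∀ acc : List Char,
    pvAWhile fuel r ((t : Int) - 1) acc =
      acc ++ ((List.range t).reverse.map (pvBlock r)).flatten := by
  intro n
  induction n using Nat.strong_induction_on with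
  | _ n ih =>
    intro r hrn t ht hr0 hrt fuel hf acc
    obtain ⟨f, rfl⟩ : ∃ f, fuel = f + 1 := ⟨fuel - 1, by omega⟩
    by_cases hpos : 0 < r
    · have ht1 : 1 ≤ t := by
        by_contra h
        have ht0 : t = 0 := by omega
        subst ht0
        simp [pvW] at hrt; omega
      obtain ⟨i0, hi0t, hle, hlt1, hfind⟩ := pvAFind_spec r (by omega) t ht1 ht hrt
      have hWpos := pvW_pos i0
      have key : pvAWhile (f + 1) r ((t : Int) - 1) acc
          = pvAWhile f (PySem.Int.mod r (pvW i0)) ((i0 : Int) - 1)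
              (acc ++ List.replicate (r / pvW i0).toNat (pvL i0)) := by
        simp only [pvAWhile, if_pos hpos, hfind]
        rw [pvWeights_getD i0 (by omega), pvAlphabet_getD i0 (by omega),
            PySem.List.pyRepeat_singleton, PySem.Int.floordiv_eq_ediv_of_pos hWpos]
      rw [key, PySem.Int.mod_eq_emod_of_pos hWpos]
      have hr'0 : 0 ≤ r % pvW i0 := Int.emod_nonneg r (ne_of_gt hWpos)
      have hr'lt : r % pvW i0 < pvW i0 := Int.emod_lt_of_pos r hWpos
      have hr'r : r % pvW i0 < r := lt_of_lt_of_le hr'lt hle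
      rw [ih (r % pvW i0).toNat (by omega) _ rfl i0 (by omega) hr'0 hr'lt f (by omega) _]
      rw [flatten_desc r i0 t hi0t
            (fun j hj1 _ => pvBlock_of_lt r j hr0 (lt_of_lt_of_le hlt1 (pvW_mono hj1)))]
      have hbi0 : pvBlock r i0 = List.replicate (r / pvW i0).toNat (pvL i0) := by
        simp [pvBlock, Int.emod_eq_of_lt hr0 hlt1]
      have hmapeq : (List.range i0).reverse.map (pvBlock (r % pvW i0))
          = (List.range i0).reverse.map (pvBlock r) := by
        apply List.map_congr_left
        intro j hj
        have hji : j < i0 := by simp [List.mem_reverse, List.mem_range] at hj; omega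
        exact pvBlock_mod r i0 j hji
      rw [hmapeq, hbi0, List.append_assoc]
    · have hr00 : r = 0 := by omega
      subst hr00
      have hz : (List.range t).reverse.map (pvBlock 0)
          = (List.range t).reverse.map (fun _ => ([] : List Char)) :=
        List.map_congr_left (fun i _ => pvBlock_zero i)
      simp [pvAWhile, hz]

-- B's digit-extraction loop computes quotient/remainder chains of pvW
lemma digitsAux (w : Int) :
    ∀ m : Nat,
    (List.range m).foldl
        (fun (st : List Int × Int) (k : Nat) =>
          (st.1 ++ [PySem.Int.mod st.2 (3 + (k : Int))], PySem.Int.floordiv st.2 (3 + (k : Int))))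
        ([], w)
      = ((List.range m).map (fun j => w / pvW j % ((j : Int) + 3)), w / pvW m) := by
  intro m
  induction m with
  | zero => simp [pvW]
  | succ m ih =>
    rw [List.range_succ, List.foldl_append, ih]
    have h3 : (0 : Int) < 3 + (m : Int) := by positivity
    simp only [List.foldl_cons, List.foldl_nil, List.map_append, List.map_cons, List.map_nil,
      Prod.mk.injEq]
    constructor
    · rw [PySem.Int.mod_eq_emod_of_pos h3]
      norm_num [add_comm]
    · rw [PySem.Int.floordiv_eq_ediv_of_pos h3,
          Int.ediv_ediv_of_nonneg (le_of_lt (pvW_pos m))]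
      have : pvW m * (3 + (m : Int)) = pvW (m + 1) := by simp [pvW]; ring
      rw [this]

lemma pvBDigits_eq (w : Int) :
    pvBDigits w = ((List.range 25).map (fun j => w / pvW j % ((j : Int) + 3)), w / pvW 25) := by
  have hr : PySem.List.pyRange 3 28 1 = (List.range 25).map (fun k => 3 + (k : Int)) := by
    decide
  unfold pvBDigits
  rw [hr, List.foldl_map]
  exact digitsAux w 25

-- a % (c*b) / b = a / b % c  (the mixed-radix digit identity)
lemma emod_mul_ediv (a b c : Int) (hb : 0 < b) (_hc : 0 < c) :
    a % (c * b) / b = a / b % c := by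
  have h1 : a % (c * b) = a + (-(c * (a / (c * b)))) * b := by
    rw [Int.emod_def]; ring
  rw [h1, Int.add_mul_ediv_right _ _ (ne_of_gt hb), Int.emod_def,
      Int.ediv_ediv_of_nonneg (le_of_lt hb), mul_comm b c]
  ring

-- reverse of a flatten of palindromic blocks in descending order = ascending flatten
lemma flatten_rev_eq (f : Nat → List Char) (hpal : ∀ i, (f i).reverse = f i) :
    ∀ t : Nat, (((List.range t).reverse.map f).flatten).reverse = ((List.range t).map f).flatten := by
  intro t
  induction t with
  | zero => simp
  | succ n ih =>
    rw [List.range_succ]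
    rw [List.map_reverse] at ih
    simp [List.reverse_append, List.flatten_append, ih, hpal]

-- the two char lists agree for 0 < weight < pvW 26
lemma lists_eq (w : Int) (h0 : 0 < w) (h1 : w < pvW 26) :
    (pvAWhile (w.toNat + 1) w 25 []).reverse =
      (PySem.List.pyRange 0 26 1).foldl
        (fun acc i =>
          acc ++ PySem.List.pyRepeat [Char.ofNat (65 + i).toNat]
            (PySem.List.pyGetD ((pvBDigits w).1 ++ [(pvBDigits w).2]) i 0)) [] := by
  have hA := pvAWhile_spec w.toNat w rfl 26 (le_refl 26) (le_of_lt h0) h1 (w.toNat + 1)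
    (by omega) []
  have h25 : ((26 : Nat) : Int) - 1 = 25 := by norm_num
  rw [h25] at hA
  rw [hA, List.nil_append, pvBDigits_eq]
  have hr : PySem.List.pyRange 0 26 1 = (List.range 26).map (Nat.cast : Nat → Int) := by
    decide
  rw [hr, List.foldl_map, PySem.List.foldl_append_eq_flatMap, List.nil_append]
  -- reverse of the descending concatenation = ascending concatenation (blocks are replicates)
  have hrev : (((List.range 26).reverse.map (pvBlock w)).flatten).reverse
      = ((List.range 26).map (pvBlock w)).flatten :=
    flatten_rev_eq (pvBlock w) (fun i => by simp [pvBlock, List.reverse_replicate]) 26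
  rw [hrev, List.flatMap_def]
  apply congrArg List.flatten
  apply List.map_congr_left
  intro k hk
  have hk26 : k < 26 := List.mem_range.mp hk
  rw [PySem.List.pyRepeat_singleton, PySem.List.pyGetD_natCast]
  have hchar : ((65 : Int) + (k : Int)).toNat = 65 + k := by omega
  rw [hchar]
  by_cases hk25 : k < 25
  · have hlen : k < ((List.range 25).map (fun j => w / pvW j % ((j : Int) + 3))).length := by
      simpa using hk25
    rw [List.getD_append _ _ _ _ hlen, List.getD_eq_getElem _ _ hlen, List.getElem_map,
        List.getElem_range]
    have hWk : pvW (k + 1) = ((k : Int) + 3) * pvW k := by simp [pvW]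
    simp only [pvBlock, pvL, hWk,
      emod_mul_ediv w (pvW k) ((k : Int) + 3) (pvW_pos k) (by positivity)]
  · have hk : k = 25 := by omega
    subst hk
    have hlen : ((List.range 25).map (fun j => w / pvW j % ((j : Int) + 3))).length = 25 := by
      simp
    have hgd : (((List.range 25).map (fun j => w / pvW j % ((j : Int) + 3))) ++ [w / pvW 25]).getD 25 0
        = w / pvW 25 := by
      rw [List.getD_eq_getElem _ _ (by simp), List.getElem_append_right (by simp)]
      simp
    rw [hgd]
    simp [pvBlock, pvL, Int.emod_eq_of_lt (le_of_lt h0) h1]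

-- ===== VERDICT (by name: the statement is the Claim_ definition above) =====
theorem smallestString_spec : Claim_equal_smallestString := by
  intro weight hdom
  unfold Spec_smallestString smallestString smallestString_alt
  by_cases hw : weight ≤ 0
  · have h1 : pvAWhile (weight.toNat + 1) weight 25 [] = [] := by
      simp [pvAWhile, not_lt.mpr hw]
    simp [hw, h1]
  · replace hw : 0 < weight := by omega
    have hlt : weight < pvW 26 := by
      unfold Dom_smallestString pvDomInt at hdom
      simp at hdom
      have : (2147483648 : Int) < pvW 26 := by norm_num [pvW]
      omega
    simp only [if_neg (by omega : ¬ weight ≤ 0)]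
    exact congrArg String.ofList (lists_eq weight hw hlt)
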